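-- pv_equiv track=rewrite | github.com/KABIR-VERMA/HR-ANSWERSET | string_perm/main.py | countPerms
-- ===== SOURCE A (Python) =====
-- def countPerms(n):
--     # Write your code here
--         arr = [[1,1,1,1,1]]
--         for i in range(1, n):
--             lis = arr[i-1]
--             temp = [lis[1]% (1000000007), (lis[0] + lis[2])% (1000000007), (lis[0] + lis[1] +\
--                     lis[3] + lis[4])% (1000000007), (lis[2] + lis[4])% (1000000007), lis[0]% (1000000007)]
--             arr.append(temp)
--         return sum(arr[-1]) % (1000000007)
-- ===== SOURCE B (Python) =====
-- MOD = 1000000007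
--
-- _M = [[0, 1, 0, 0, 0],
--       [1, 0, 1, 0, 0],
--       [1, 1, 0, 1, 1],
--       [0, 0, 1, 0, 1],
--       [1, 0, 0, 0, 0]]
--
--
-- def _matmul(a, b):
--     return [[sum(a[i][k] * b[k][j] for k in range(5)) % MOD for j in range(5)]
--             for i in range(5)]
--
--
-- def _matpow(m, e):
--     if e == 0:
--         return [[1 if i == j else 0 for j in range(5)] for i in range(5)]
--     h = _matpow(_matmul(m, m), e // 2)
--     return _matmul(m, h) if e % 2 == 1 else h
--
--
-- def countPerms(n):
--     e = max(n - 1, 0)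
--     p = _matpow(_M, e)
--     # state vector starts as all ones, so the answer is the sum of all entries
--     return sum(p[i][j] for i in range(5) for j in range(5)) % MOD
-- ===== Notes on version B (the rewrite author's own statement) =====
-- stated objective: faster
-- what changed: Replaces A's step-by-step iteration of the 5-state recurrence (building a list of all n vectors) by binary exponentiation of the fixed 5x5 transition matrix mod 1e9+7, summing the entries of M^(n-1).
import Mathlib
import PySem

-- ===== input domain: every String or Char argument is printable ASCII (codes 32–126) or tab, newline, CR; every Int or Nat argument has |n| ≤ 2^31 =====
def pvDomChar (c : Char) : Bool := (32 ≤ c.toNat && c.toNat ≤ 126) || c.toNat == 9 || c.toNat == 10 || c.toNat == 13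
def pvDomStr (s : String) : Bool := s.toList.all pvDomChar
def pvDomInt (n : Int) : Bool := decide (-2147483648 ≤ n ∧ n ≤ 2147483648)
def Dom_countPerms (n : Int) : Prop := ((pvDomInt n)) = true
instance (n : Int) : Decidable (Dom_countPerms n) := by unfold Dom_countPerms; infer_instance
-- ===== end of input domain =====

-- B replaces A's O(n) step-by-step iteration of the 5-state recurrence by O(log n)
-- binary exponentiation of the fixed 5x5 transition matrix mod 1e9+7.

-- ===== PORT A =====
-- literal port of A: build the list of state vectors, one per loop iteration
def countPerms (n : Int) : Int :=
  PySem.Int.mod (PySem.List.pyGetD ((PySem.List.pyRange 1 n 1).foldl (fun arr i =>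
    let lis := PySem.List.pyGetD arr (i - 1) []
    let temp := [PySem.Int.mod (PySem.List.pyGetD lis 1 0) 1000000007,
                 PySem.Int.mod (PySem.List.pyGetD lis 0 0 + PySem.List.pyGetD lis 2 0) 1000000007,
                 PySem.Int.mod (PySem.List.pyGetD lis 0 0 + PySem.List.pyGetD lis 1 0 +
                   PySem.List.pyGetD lis 3 0 + PySem.List.pyGetD lis 4 0) 1000000007,
                 PySem.Int.mod (PySem.List.pyGetD lis 2 0 + PySem.List.pyGetD lis 4 0) 1000000007,
                 PySem.Int.mod (PySem.List.pyGetD lis 0 0) 1000000007]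
    arr ++ [temp]) [[1, 1, 1, 1, 1]]) (-1) []).sum 1000000007

-- ===== PORT B =====
-- the fixed transition matrix _M of Source B
def pvBM : List (List Int) :=
  [[0, 1, 0, 0, 0], [1, 0, 1, 0, 0], [1, 1, 0, 1, 1], [0, 0, 1, 0, 1], [1, 0, 0, 0, 0]]

-- _matmul of Source B (comprehensions over range(5); entry (i,j) = sum over k, reduced mod 1e9+7)
def pvBMul (a b : List (List Int)) : List (List Int) :=
  (List.range 5).map (fun i => (List.range 5).map (fun j =>
    PySem.Int.mod (∑ k ∈ Finset.range 5, (a.getD i []).getD k 0 * (b.getD k []).getD j 0)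
      1000000007))

-- _matpow of Source B (recursion on e // 2; the exponent is a nonnegative count, so Nat)
def pvBPow (m : List (List Int)) (e : Nat) : List (List Int) :=
  if h : e = 0 then
    (List.range 5).map (fun i => (List.range 5).map (fun j => if i = j then (1 : Int) else 0))
  else
    let hh := pvBPow (pvBMul m m) (e / 2)
    if e % 2 = 1 then pvBMul m hh else hh
decreasing_by exact Nat.div_lt_self (Nat.pos_of_ne_zero h) (by norm_num)

def countPerms_alt (n : Int) : Int :=
  PySem.Int.mod
    (∑ i ∈ Finset.range 5, ∑ j ∈ Finset.range 5,
      ((pvBPow pvBM (max (n - 1) 0).toNat).getD i []).getD j 0) 1000000007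

-- ===== PRECONDITION & SPEC =====
def Spec_countPerms (n : Int) (out : Int) : Prop := out = countPerms_alt n
instance (n : Int) (out : Int) : Decidable (Spec_countPerms n out) := by unfold Spec_countPerms; infer_instance

-- ===== CLAIM (what is proved, stated in full; the proofs are below) =====
def Claim_equal_countPerms : Prop := ∀ (n : Int), Dom_countPerms n → Spec_countPerms n (countPerms n)

-- ===== LEMMAS AND PROOFS =====

-- proof-side Fin-indexed view of the list matrices
def pvToFun (a : List (List Int)) : Fin 5 → Fin 5 → Int :=
  fun i j => (a.getD i []).getD j 0

def pvFMul (a b : Fin 5 → Fin 5 → Int) : Fin 5 → Fin 5 → Int :=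
  fun i j => PySem.Int.mod (∑ k : Fin 5, a i k * b k j) 1000000007

def pvFPow (m : Fin 5 → Fin 5 → Int) (e : Nat) : Fin 5 → Fin 5 → Int :=
  if h : e = 0 then fun i j => if i = j then 1 else 0
  else
    let hh := pvFPow (pvFMul m m) (e / 2)
    if e % 2 = 1 then pvFMul m hh else hh
decreasing_by exact Nat.div_lt_self (Nat.pos_of_ne_zero h) (by norm_num)

theorem pv_getD_map_range5 {α : Type} (f : Nat → α) (i : Fin 5) (d : α) :
    ((List.range 5).map f).getD i d = f i := by
  fin_cases i <;> simp [List.range_succ]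

theorem pvToFun_mul (a b : List (List Int)) :
    pvToFun (pvBMul a b) = pvFMul (pvToFun a) (pvToFun b) := by
  funext i j
  show ((pvBMul a b).getD i []).getD j 0 = _
  rw [pvBMul, pv_getD_map_range5, pv_getD_map_range5]
  simp [pvFMul, pvToFun, Finset.sum_range]

theorem pvToFun_pow (m : List (List Int)) (e : Nat) :
    pvToFun (pvBPow m e) = pvFPow (pvToFun m) e := by
  induction e using Nat.strong_induction_on generalizing m with
  | _ e ih =>
    rw [pvBPow, pvFPow]
    by_cases h : e = 0
    · subst h
      simp only [dif_pos]
      funext i j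
      show ((((List.range 5).map _).getD i []).getD j 0 : Int) = _
      rw [pv_getD_map_range5, pv_getD_map_range5]
      simp [Fin.ext_iff]
    · rw [dif_neg h, dif_neg h]
      have hlt : e / 2 < e := Nat.div_lt_self (Nat.pos_of_ne_zero h) (by norm_num)
      by_cases h1 : e % 2 = 1
      · rw [if_pos h1, if_pos h1, pvToFun_mul, ih _ hlt, pvToFun_mul]
      · rw [if_neg h1, if_neg h1, ih _ hlt, pvToFun_mul]

-- the step function of A's loop body, on one state vector
def pvStep (l : List Int) : List Int :=
  [PySem.Int.mod (PySem.List.pyGetD l 1 0) 1000000007,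
   PySem.Int.mod (PySem.List.pyGetD l 0 0 + PySem.List.pyGetD l 2 0) 1000000007,
   PySem.Int.mod (PySem.List.pyGetD l 0 0 + PySem.List.pyGetD l 1 0 +
     PySem.List.pyGetD l 3 0 + PySem.List.pyGetD l 4 0) 1000000007,
   PySem.Int.mod (PySem.List.pyGetD l 2 0 + PySem.List.pyGetD l 4 0) 1000000007,
   PySem.Int.mod (PySem.List.pyGetD l 0 0) 1000000007]

def pvVec : Nat → List Int
  | 0 => [1, 1, 1, 1, 1]
  | k + 1 => pvStep (pvVec k)

-- cast to ZMod 1000000007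
def pvCastM (a : Fin 5 → Fin 5 → Int) : Matrix (Fin 5) (Fin 5) (ZMod 1000000007) :=
  Matrix.of fun i j => ((a i j : Int) : ZMod 1000000007)

def pvCastV (l : List Int) : Fin 5 → ZMod 1000000007 :=
  fun i => ((l.getD i 0 : Int) : ZMod 1000000007)

theorem pv_emod_cast (a : Int) :
    ((a % 1000000007 : Int) : ZMod 1000000007) = (a : ZMod 1000000007) := by
  exact_mod_cast ZMod.intCast_mod a 1000000007

theorem pvCastM_mul (a b : Fin 5 → Fin 5 → Int) :
    pvCastM (pvFMul a b) = pvCastM a * pvCastM b := by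
  ext i j
  simp [pvCastM, pvFMul, Matrix.mul_apply, pv_emod_cast]

theorem pvCastM_pow (m : Fin 5 → Fin 5 → Int) (e : Nat) :
    pvCastM (pvFPow m e) = (pvCastM m) ^ e := by
  induction e using Nat.strong_induction_on generalizing m with
  | _ e ih =>
    rw [pvFPow]
    by_cases h : e = 0
    · subst h
      simp only [dif_pos]
      ext i j
      simp [pvCastM, Matrix.one_apply]
    · rw [dif_neg h]
      have hlt : e / 2 < e := Nat.div_lt_self (Nat.pos_of_ne_zero h) (by norm_num)
      have hrec : pvCastM (pvFPow (pvFMul m m) (e / 2)) = (pvCastM m) ^ (2 * (e / 2)) := by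
        rw [ih _ hlt, pvCastM_mul, ← sq, ← pow_mul]
      have he : e % 2 = 1 ∨ e % 2 = 0 := by omega
      rcases he with h1 | h0
      · rw [if_pos h1, pvCastM_mul, hrec, ← pow_succ']
        congr 1
        omega
      · rw [if_neg (by omega), hrec]
        congr 1
        omega

theorem pvVec_length (k : Nat) : (pvVec k).length = 5 := by
  cases k <;> simp [pvVec, pvStep]

-- a length-5 list destructed into its elements
theorem pv_len5 (l : List Int) (h : l.length = 5) :
    ∃ a b c d e : Int, l = [a, b, c, d, e] := by
  rcases l with _ | ⟨a, _ | ⟨b, _ | ⟨c, _ | ⟨d, _ | ⟨e, _ | ⟨f, t⟩⟩⟩⟩⟩⟩ <;> simp_all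

theorem pvStep_cast (l : List Int) (h : l.length = 5) :
    pvCastV (pvStep l) = (pvCastM (pvToFun pvBM)).mulVec (pvCastV l) := by
  obtain ⟨a, b, c, d, e, rfl⟩ := pv_len5 l h
  funext i
  fin_cases i <;>
    simp [pvStep, pvCastV, pvCastM, pvToFun, pvBM, Matrix.mulVec, dotProduct,
      Fin.sum_univ_five, PySem.List.pyGetD, PySem.List.pyGet?, PySem.List.pyIdx?,
      pv_emod_cast]

theorem pvVec_cast (k : Nat) :
    pvCastV (pvVec k) = ((pvCastM (pvToFun pvBM)) ^ k).mulVec (fun _ => (1 : ZMod 1000000007)) := by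
  induction k with
  | zero =>
    funext i
    fin_cases i <;> simp [pvVec, pvCastV, Matrix.mulVec, dotProduct, Fin.sum_univ_five]
  | succ k ih =>
    show pvCastV (pvStep (pvVec k)) = _
    rw [pvStep_cast _ (pvVec_length k), ih, Matrix.mulVec_mulVec, ← pow_succ']

-- A's loop produces the list of all state vectors
theorem pv_loopA (k : Nat) :
    (PySem.List.pyRange 1 (1 + k) 1).foldl (fun arr i =>
      let lis := PySem.List.pyGetD arr (i - 1) []
      let temp := [PySem.Int.mod (PySem.List.pyGetD lis 1 0) 1000000007,
                   PySem.Int.mod (PySem.List.pyGetD lis 0 0 + PySem.List.pyGetD lis 2 0) 1000000007,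
                   PySem.Int.mod (PySem.List.pyGetD lis 0 0 + PySem.List.pyGetD lis 1 0 +
                     PySem.List.pyGetD lis 3 0 + PySem.List.pyGetD lis 4 0) 1000000007,
                   PySem.Int.mod (PySem.List.pyGetD lis 2 0 + PySem.List.pyGetD lis 4 0) 1000000007,
                   PySem.Int.mod (PySem.List.pyGetD lis 0 0) 1000000007]
      arr ++ [temp]) [[1, 1, 1, 1, 1]] = (List.range (k + 1)).map pvVec := by
  induction k with
  | zero =>
    rw [PySem.List.pyRange_one_eq_nil (by norm_num)]
    simp [pvVec]
  | succ k ih =>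
    have hsplit : PySem.List.pyRange 1 (1 + (k + 1 : Nat)) 1
        = PySem.List.pyRange 1 (1 + k) 1 ++ [(1 + k : Int)] := by
      have h2 : (1 : Int) + ((k : Nat) + 1 : Nat) = ((1 + k : Int)) + 1 := by push_cast; ring
      rw [h2, PySem.List.pyRange_one_succ_right (by omega)]
    rw [hsplit, List.foldl_append, ih]
    simp only [List.foldl_cons, List.foldl_nil]
    have hget : PySem.List.pyGetD ((List.range (k + 1)).map pvVec) ((1 + k : Int) - 1) []
        = pvVec k := by
      have h3 : ((1 : Int) + k) - 1 = (k : Int) := by ring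
      rw [h3]
      simp [PySem.List.pyGetD, PySem.List.pyGet?, PySem.List.pyIdx?]
    rw [hget]
    have : (List.range (k + 1 + 1)).map pvVec
        = (List.range (k + 1)).map pvVec ++ [pvVec (k + 1)] := by
      rw [List.range_succ, List.map_append]
      rfl
    rw [this]
    rfl

theorem pv_last (k : Nat) :
    PySem.List.pyGetD ((List.range (k + 1)).map pvVec) (-1) [] = pvVec k := by
  simp [PySem.List.pyGetD, PySem.List.pyGet?, PySem.List.pyIdx?]

theorem pv_sum5 (l : List Int) (h : l.length = 5) :
    ((l.sum : Int) : ZMod 1000000007) = ∑ i : Fin 5, pvCastV l i := by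
  obtain ⟨a, b, c, d, e, rfl⟩ := pv_len5 l h
  simp [pvCastV, Fin.sum_univ_five]
  ring

theorem pv_A_eq (n : Int) :
    countPerms n = PySem.Int.mod (pvVec (n - 1).toNat).sum 1000000007 := by
  unfold countPerms
  have hr : PySem.List.pyRange 1 n 1 = PySem.List.pyRange 1 (1 + ((n - 1).toNat : Int)) 1 := by
    by_cases h : n ≤ 1
    · rw [PySem.List.pyRange_one_eq_nil h, PySem.List.pyRange_one_eq_nil (by omega)]
    · congr 1
      omega
  rw [hr, pv_loopA, pv_last]

theorem pv_sumEntries (a : List (List Int)) :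
    (∑ i ∈ Finset.range 5, ∑ j ∈ Finset.range 5, (a.getD i []).getD j 0)
      = ∑ i : Fin 5, ∑ j : Fin 5, pvToFun a i j := by
  simp [Finset.sum_range_succ, Fin.sum_univ_five, pvToFun]

theorem pv_B_eq (n : Int) :
    countPerms_alt n
      = PySem.Int.mod (∑ i : Fin 5, ∑ j : Fin 5, pvToFun (pvBPow pvBM (n - 1).toNat) i j)
          1000000007 := by
  unfold countPerms_alt
  have h1 : (max (n - 1) 0).toNat = (n - 1).toNat := by omega
  rw [h1, pv_sumEntries]

-- ===== VERDICT (by name: the statement is the Claim_ definition above) =====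
theorem countPerms_spec : Claim_equal_countPerms := by
  intro n _
  unfold Spec_countPerms
  rw [pv_A_eq, pv_B_eq]
  set k := (n - 1).toNat with hk
  rw [PySem.Int.mod_eq_emod_of_pos (by norm_num), PySem.Int.mod_eq_emod_of_pos (by norm_num)]
  have hcast : (((pvVec k).sum : Int) : ZMod 1000000007)
      = ((∑ i : Fin 5, ∑ j : Fin 5, pvToFun (pvBPow pvBM k) i j : Int) : ZMod 1000000007) := by
    rw [pv_sum5 _ (pvVec_length k)]
    have hv := pvVec_cast k
    have hp : pvCastM (pvToFun (pvBPow pvBM k)) = (pvCastM (pvToFun pvBM)) ^ k := by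
      rw [pvToFun_pow, pvCastM_pow]
    calc ∑ i : Fin 5, pvCastV (pvVec k) i
        = ∑ i : Fin 5, ((pvCastM (pvToFun pvBM)) ^ k).mulVec (fun _ => (1 : ZMod 1000000007)) i := by
          rw [hv]
      _ = ∑ i : Fin 5, ∑ j : Fin 5, ((pvCastM (pvToFun pvBM)) ^ k) i j := by
          simp [Matrix.mulVec, dotProduct]
      _ = ((∑ i : Fin 5, ∑ j : Fin 5, pvToFun (pvBPow pvBM k) i j : Int) : ZMod 1000000007) := by
          rw [← hp]
          push_cast
          simp [pvCastM]
  have := (ZMod.intCast_eq_intCast_iff' _ _ 1000000007).mp hcast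
  exact_mod_cast this
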